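-- pv_equiv track=rewrite | github.com/GBoshnakov/SoftUni-Advanced | Exams/24 October 2020/02.Checkmate.py | second_diagonal
-- ===== SOURCE A (Python) =====
-- SIZE = 8
--
-- def check_range(row, col, size=SIZE):
--     if 0 <= row < size and 0 <= col < size:
--         return True
--     return False
--
-- def second_diagonal(row, col, matrix):
--     check = []
--     for n in range(1, 8):
--         if check_range(row+n, col-n) and matrix[row+n][col-n] == "K":
--             check.append(True)
--             break
--         elif check_range(row+n, col-n) and matrix[row+n][col-n] == "Q":
--             check.append(False)
--             break
--     for n in range(1, 8):
--         if check_range(row-n, col+n) and matrix[row-n][col+n] == "K":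
--             check.append(True)
--             break
--         elif check_range(row-n, col+n) and matrix[row-n][col+n] == "Q":
--             check.append(False)
--             break
--     return any(check)
-- ===== SOURCE B (Python) =====
-- SIZE = 8
--
-- def second_diagonal(row, col, matrix):
--     s = row + col
--     pieces = {r: matrix[r][s - r] for r in range(8)
--               if 0 <= s - r < 8 and 1 <= abs(r - row) <= 7
--               and matrix[r][s - r] in ("K", "Q")}
--     below = [r for r in pieces if r > row]
--     above = [r for r in pieces if r < row]
--     return (below != [] and pieces[min(below)] == "K") or \
--            (above != [] and pieces[max(above)] == "K")
-- ===== Notes on version B (the rewrite author's own statement) =====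
-- stated objective: alternative
-- what changed: Instead of A's two outward stepping scans that append booleans to a list consumed by any(), B makes one bounded pass over board rows 0-7 collecting every K/Q on the anti-diagonal into a dict keyed by row, then reads off the nearest attacker on each side with min/max over the keys and checks it is 'K'.
-- outside the precondition, e.g. on second_diagonal(0, 7, [[], ['', '', '', '', '', '', 'K']]): A returns True, B raises IndexError
import Mathlib
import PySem

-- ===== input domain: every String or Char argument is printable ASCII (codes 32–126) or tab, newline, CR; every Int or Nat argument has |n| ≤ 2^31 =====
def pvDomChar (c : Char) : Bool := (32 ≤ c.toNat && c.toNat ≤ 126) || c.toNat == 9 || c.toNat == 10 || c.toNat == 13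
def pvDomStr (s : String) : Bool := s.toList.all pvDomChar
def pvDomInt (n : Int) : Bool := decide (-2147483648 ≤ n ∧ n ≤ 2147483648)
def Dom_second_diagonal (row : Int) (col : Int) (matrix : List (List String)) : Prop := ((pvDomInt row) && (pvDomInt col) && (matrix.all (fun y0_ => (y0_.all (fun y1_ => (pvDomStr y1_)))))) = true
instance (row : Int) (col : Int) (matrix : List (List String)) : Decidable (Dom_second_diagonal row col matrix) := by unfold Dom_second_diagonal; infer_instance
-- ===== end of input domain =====

-- B replaces A's two outward stepping scans (booleans appended to a list consumed by any())
-- by one bounded pass over board rows 0..7 collecting every K/Q on the anti-diagonal into a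
-- dict keyed by row, then reads off the nearest attacker on each side with min/max
-- (objective: alternative).  Equivalence is about the RETURN value; nothing is mutated.

-- ===== PORT A =====
-- matrix[r][c]: exact Python access under Pre_ (indices are 0 ≤ · < 8 at every use site);
-- outside Pre_ Python raises IndexError and the port's default "" / [] is unclaimed.
def cellAt (matrix : List (List String)) (r c : Int) : String :=
  (PySem.List.pyGet? ((PySem.List.pyGet? matrix r).getD []) c).getD ""

def check_range (row col : Int) : Bool :=
  decide (0 ≤ row) && decide (row < 8) && decide (0 ≤ col) && decide (col < 8)

-- first loop of A: returns the booleans appended to `check` (empty, [true] or [false])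
def sdLoop1 (row col : Int) (matrix : List (List String)) : List Int → List Bool
  | [] => []
  | n :: rest =>
    if check_range (row + n) (col - n) && (cellAt matrix (row + n) (col - n) == "K") then
      [true]
    else if check_range (row + n) (col - n) && (cellAt matrix (row + n) (col - n) == "Q") then
      [false]
    else sdLoop1 row col matrix rest

-- second loop of A
def sdLoop2 (row col : Int) (matrix : List (List String)) : List Int → List Bool
  | [] => []
  | n :: rest =>
    if check_range (row - n) (col + n) && (cellAt matrix (row - n) (col + n) == "K") then
      [true]
    else if check_range (row - n) (col + n) && (cellAt matrix (row - n) (col + n) == "Q") then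
      [false]
    else sdLoop2 row col matrix rest

def second_diagonal (row : Int) (col : Int) (matrix : List (List String)) : Bool :=
  let check := sdLoop1 row col matrix (PySem.List.pyRange 1 8 1)
               ++ sdLoop2 row col matrix (PySem.List.pyRange 1 8 1)
  check.any id

-- ===== PORT B =====
-- the dict comprehension of Source B: keys r are drawn from range(8) in order and are distinct,
-- so the dict's items are exactly this filterMap in row order
def kqItems (row : Int) (col : Int) (matrix : List (List String)) : List (Int × String) :=
  (PySem.List.pyRange 0 8 1).filterMap (fun r =>
    if decide (0 ≤ row + col - r) && decide (row + col - r < 8)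
        && decide (1 ≤ |r - row|) && decide (|r - row| ≤ 7)
        && (cellAt matrix r (row + col - r) == "K" || cellAt matrix r (row + col - r) == "Q")
    then some (r, cellAt matrix r (row + col - r)) else none)

-- pieces[min(below)] / pieces[max(above)]: the key is present, so the .getD defaults
-- (0 under the nonemptiness guard, "" for the dict) are unreachable
def second_diagonal_alt (row : Int) (col : Int) (matrix : List (List String)) : Bool :=
  let pieces : PySem.Dict Int String := PySem.Dict.mk (kqItems row col matrix)
  let below := pieces.keys.filter (fun r => decide (row < r))
  let above := pieces.keys.filter (fun r => decide (r < row))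
  (!below.isEmpty && (pieces.getD ((PySem.List.min? below (fun x => x)).getD 0) "" == "K"))
  || (!above.isEmpty && (pieces.getD ((PySem.List.max? above (fun x => x)).getD 0) "" == "K"))

-- ===== PRECONDITION & SPEC =====
-- Pre_ excludes the inputs on which A raises IndexError: a diagonal step inside the 8×8
-- board addressing a row/column the (possibly ragged or short) matrix does not have.
-- It is slightly narrower than A's exact return domain: it also excludes ragged matrices
-- on which A happens to return only because it stops at a piece before the missing cell
-- (there B's single pass visits the missing cell and raises too).
def preChk (row col : Int) (matrix : List (List String)) : Bool :=
  (PySem.List.pyRange 1 8 1).all (fun n =>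
    (!(check_range (row + n) (col - n))
      || (decide (row + n < (matrix.length : Int))
          && decide (col - n < (((PySem.List.pyGet? matrix (row + n)).getD []).length : Int))))
    &&
    (!(check_range (row - n) (col + n))
      || (decide (row - n < (matrix.length : Int))
          && decide (col + n < (((PySem.List.pyGet? matrix (row - n)).getD []).length : Int)))))

def Pre_second_diagonal (row : Int) (col : Int) (matrix : List (List String)) : Prop :=
  preChk row col matrix = true
instance (row : Int) (col : Int) (matrix : List (List String)) : Decidable (Pre_second_diagonal row col matrix) := by unfold Pre_second_diagonal; infer_instance

def pvWitness_second_diagonal : Int × Int × List (List String) :=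
  (0, 0, [["", "", ""], ["", "Q", ""], ["K", "", ""]])

def Spec_second_diagonal (row : Int) (col : Int) (matrix : List (List String)) (out : Bool) : Prop := out = second_diagonal_alt row col matrix
instance (row : Int) (col : Int) (matrix : List (List String)) (out : Bool) : Decidable (Spec_second_diagonal row col matrix out) := by unfold Spec_second_diagonal; infer_instance

-- ===== CLAIM (what is proved, stated in full; the proofs are below) =====
def Claim_equal_second_diagonal : Prop := ∀ (row : Int) (col : Int) (matrix : List (List String)), Dom_second_diagonal row col matrix → Pre_second_diagonal row col matrix → Spec_second_diagonal row col matrix (second_diagonal row col matrix)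

-- ===== LEMMAS AND PROOFS =====

-- the piece (if any) sitting at row r of the anti-diagonal through (row, col), as both
-- programs see it: some "K"/"Q" when the cell is on the board and holds such a piece
def fd (row col : Int) (matrix : List (List String)) (r : Int) : Option String :=
  if check_range r (row + col - r)
      && (cellAt matrix r (row + col - r) == "K" || cellAt matrix r (row + col - r) == "Q")
  then some (cellAt matrix r (row + col - r)) else none

theorem fd_eq_some_elim {row col : Int} {matrix : List (List String)} {r : Int} {p : String}
    (h : fd row col matrix r = some p) :
    check_range r (row + col - r) = true
    ∧ (cellAt matrix r (row + col - r) == "K" || cellAt matrix r (row + col - r) == "Q") = true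
    ∧ cellAt matrix r (row + col - r) = p := by
  unfold fd at h
  split at h
  · rename_i hc
    simp only [Bool.and_eq_true] at hc
    exact ⟨hc.1, hc.2, by injection h⟩
  · exact absurd h (by simp)

theorem fd_some_bounds {row col : Int} {matrix : List (List String)} {r : Int} {p : String}
    (h : fd row col matrix r = some p) : 0 ≤ r ∧ r < 8 := by
  have hc := (fd_eq_some_elim h).1
  simp only [check_range, Bool.and_eq_true, decide_eq_true_eq] at hc
  exact ⟨hc.1.1.1, hc.1.1.2⟩

theorem fd_isSome (row col : Int) (matrix : List (List String)) (r : Int) :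
    (fd row col matrix r).isSome
      = (check_range r (row + col - r)
         && (cellAt matrix r (row + col - r) == "K" || cellAt matrix r (row + col - r) == "Q")) := by
  unfold fd; split <;> simp_all

-- A-side: each scanning loop returns true iff the first piece along its ray is "K"
theorem loopA1 (row col : Int) (matrix : List (List String)) (ns : List Int) :
    (sdLoop1 row col matrix ns).any id
      = ((ns.findSome? (fun n => fd row col matrix (row + n))) == some "K") := by
  induction ns with
  | nil => simp [sdLoop1]
  | cons n rest ih =>
    simp only [sdLoop1, List.findSome?_cons]
    have harg : row + col - (row + n) = col - n := by ring
    by_cases hr : check_range (row + n) (col - n) = true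
    · by_cases hK : cellAt matrix (row + n) (col - n) = "K"
      · simp [fd, harg, hr, hK]
      · by_cases hQ : cellAt matrix (row + n) (col - n) = "Q"
        · simp [fd, harg, hr, hQ]
        · simp [fd, harg, hr, hK, hQ, ih]
    · simp only [Bool.not_eq_true] at hr
      simp [fd, harg, hr, ih]

theorem loopA2 (row col : Int) (matrix : List (List String)) (ns : List Int) :
    (sdLoop2 row col matrix ns).any id
      = ((ns.findSome? (fun n => fd row col matrix (row - n))) == some "K") := by
  induction ns with
  | nil => simp [sdLoop2]
  | cons n rest ih =>
    simp only [sdLoop2, List.findSome?_cons]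
    have harg : row + col - (row - n) = col + n := by ring
    by_cases hr : check_range (row - n) (col + n) = true
    · by_cases hK : cellAt matrix (row - n) (col + n) = "K"
      · simp [fd, harg, hr, hK]
      · by_cases hQ : cellAt matrix (row - n) (col + n) = "Q"
        · simp [fd, harg, hr, hQ]
        · simp [fd, harg, hr, hK, hQ, ih]
    · simp only [Bool.not_eq_true] at hr
      simp [fd, harg, hr, ih]

-- generic list lemmas
theorem findSome?_eq_head?_filter (f : Int → Option String) (l : List Int) :
    l.findSome? f = ((l.filter (fun x => (f x).isSome)).head?).bind f := by
  induction l with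
  | nil => simp
  | cons a t ih =>
    simp only [List.findSome?_cons, List.filter_cons]
    cases h : f a with
    | some p => simp [h]
    | none => simp [ih]

theorem map_fst_filterMap (l : List Int) (p : Int → Bool) (g : Int → String) :
    (l.filterMap (fun r => if p r then some (r, g r) else none)).map Prod.fst = l.filter p := by
  induction l with
  | nil => simp
  | cons a t ih =>
    by_cases h : p a = true
    · simp [List.filter_cons, h, ih]
    · simp only [Bool.not_eq_true] at h
      simp [List.filterMap_cons, h, ih]

theorem foldl_min_of_le (t : List Int) (x : Int) (h : ∀ y ∈ t, x ≤ y) : t.foldl min x = x := by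
  induction t generalizing x with
  | nil => rfl
  | cons a t ih =>
    rw [List.foldl_cons, min_eq_left (h a List.mem_cons_self)]
    exact ih x (fun y hy => h y (List.mem_cons_of_mem _ hy))

theorem min?_of_sorted (l : List Int) (h : l.Pairwise (· ≤ ·)) :
    PySem.List.min? l (fun x => x) = l.head? := by
  cases l with
  | nil => rfl
  | cons x t =>
    rw [PySem.List.min?_id_cons, foldl_min_of_le t x (List.pairwise_cons.mp h).1]
    rfl

theorem foldl_max_getLast? (t : List Int) (x : Int) (h : (x :: t).Pairwise (· ≤ ·)) :
    some (t.foldl max x) = (x :: t).getLast? := by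
  induction t generalizing x with
  | nil => rfl
  | cons a t ih =>
    rw [List.foldl_cons, max_eq_right ((List.pairwise_cons.mp h).1 a List.mem_cons_self)]
    rw [List.getLast?_cons_cons]
    exact ih a (List.pairwise_cons.mp h).2

theorem max?_of_sorted (l : List Int) (h : l.Pairwise (· ≤ ·)) :
    PySem.List.max? l (fun x => x) = l.getLast? := by
  cases l with
  | nil => rfl
  | cons x t => rw [PySem.List.max?_id_cons, foldl_max_getLast? t x h]

-- B-side: the dict's keys in row order
theorem keys_kq (row col : Int) (matrix : List (List String)) :
    (PySem.Dict.mk (kqItems row col matrix)).keys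
      = (PySem.List.pyRange 0 8 1).filter (fun r =>
          decide (0 ≤ row + col - r) && decide (row + col - r < 8)
          && decide (1 ≤ |r - row|) && decide (|r - row| ≤ 7)
          && (cellAt matrix r (row + col - r) == "K" || cellAt matrix r (row + col - r) == "Q")) := by
  rw [PySem.Dict.keys_mk]
  exact map_fst_filterMap _ _ _

theorem nodup_keys_kq (row col : Int) (matrix : List (List String)) :
    (PySem.Dict.mk (kqItems row col matrix)).keys.Nodup := by
  rw [keys_kq]
  exact (PySem.List.nodup_pyRange_one 0 8).filter _

theorem mem_kqItems {row col : Int} {matrix : List (List String)} {r : Int} {p : String}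
    (hfd : fd row col matrix r = some p) (hd1 : 1 ≤ |r - row|) (hd7 : |r - row| ≤ 7) :
    (r, p) ∈ kqItems row col matrix := by
  obtain ⟨hc, hkq, hcell⟩ := fd_eq_some_elim hfd
  have hb := fd_some_bounds hfd
  have hc' := hc
  simp only [check_range, Bool.and_eq_true, decide_eq_true_eq] at hc'
  unfold kqItems
  rw [List.mem_filterMap]
  refine ⟨r, PySem.List.mem_pyRange_one.mpr hb, ?_⟩
  rw [if_pos, hcell]
  simp only [Bool.and_eq_true, decide_eq_true_eq]
  exact ⟨⟨⟨⟨hc'.1.2, hc'.2⟩, hd1⟩, hd7⟩, hkq⟩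

-- B's "below" key list is the board cells row+1 .. row+7 of the ray holding a piece, ascending
theorem below_eq (row col : Int) (matrix : List (List String)) :
    (PySem.Dict.mk (kqItems row col matrix)).keys.filter (fun r => decide (row < r))
      = ((PySem.List.pyRange 1 8 1).map (fun n => row + n)).filter
          (fun r => (fd row col matrix r).isSome) := by
  rw [keys_kq, List.filter_filter]
  have hmap : (((PySem.List.pyRange 1 8 1).map (fun n => row + n)).Pairwise (· < ·)) := by
    refine List.Pairwise.map _ ?_ (PySem.List.pairwise_lt_pyRange_one 1 8)
    intro a b hab; omega
  apply List.eq_of_perm_of_sorted (le := fun a b : Int => a ≤ b)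
    (fun a b _ _ h1 h2 => le_antisymm h1 h2)
  · exact ((PySem.List.pairwise_lt_pyRange_one 0 8).filter _).imp le_of_lt
  · exact (hmap.filter _).imp le_of_lt
  · refine (List.perm_ext_iff_of_nodup ((PySem.List.nodup_pyRange_one 0 8).filter _)
      ((hmap.imp (fun h => ne_of_lt h)).filter _)).mpr ?_
    intro a
    simp only [List.mem_filter, List.mem_map, PySem.List.mem_pyRange_one, fd_isSome,
      check_range, Bool.and_eq_true, decide_eq_true_eq, Int.abs_eq_natAbs]
    constructor
    · rintro ⟨⟨h0, h8⟩, hlt, ⟨⟨⟨⟨hc0, hc8⟩, hd1⟩, hd7⟩, hkq⟩⟩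
      exact ⟨⟨a - row, ⟨by omega, by omega⟩, by ring⟩, ⟨⟨⟨⟨h0, h8⟩, hc0⟩, hc8⟩, hkq⟩⟩
    · rintro ⟨⟨n, ⟨hn1, hn8⟩, rfl⟩, ⟨⟨⟨⟨h0, h8⟩, hc0⟩, hc8⟩, hkq⟩⟩
      exact ⟨⟨h0, h8⟩, by omega, ⟨⟨⟨⟨hc0, hc8⟩, by omega⟩, by omega⟩, hkq⟩⟩

-- B's "above" key list is the board cells row-1 .. row-7 holding a piece, in ascending key
-- order, i.e. the reverse of the near-to-far scan order
theorem above_eq (row col : Int) (matrix : List (List String)) :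
    (PySem.Dict.mk (kqItems row col matrix)).keys.filter (fun r => decide (r < row))
      = (((PySem.List.pyRange 1 8 1).map (fun n => row - n)).filter
          (fun r => (fd row col matrix r).isSome)).reverse := by
  rw [keys_kq, List.filter_filter]
  have hmap : (((PySem.List.pyRange 1 8 1).map (fun n => row - n)).Pairwise (fun a b => b < a)) := by
    refine List.Pairwise.map _ ?_ (PySem.List.pairwise_lt_pyRange_one 1 8)
    intro a b hab; omega
  apply List.eq_of_perm_of_sorted (le := fun a b : Int => a ≤ b)
    (fun a b _ _ h1 h2 => le_antisymm h1 h2)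
  · exact ((PySem.List.pairwise_lt_pyRange_one 0 8).filter _).imp le_of_lt
  · exact List.pairwise_reverse.mpr ((hmap.filter _).imp (fun h => le_of_lt h))
  · refine (List.perm_ext_iff_of_nodup ((PySem.List.nodup_pyRange_one 0 8).filter _)
      (List.nodup_reverse.mpr ((hmap.imp (fun h => (ne_of_lt h).symm)).filter _))).mpr ?_
    intro a
    simp only [List.mem_reverse, List.mem_filter, List.mem_map, PySem.List.mem_pyRange_one,
      fd_isSome, check_range, Bool.and_eq_true, decide_eq_true_eq, Int.abs_eq_natAbs]
    constructor
    · rintro ⟨⟨h0, h8⟩, hlt, ⟨⟨⟨⟨hc0, hc8⟩, hd1⟩, hd7⟩, hkq⟩⟩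
      exact ⟨⟨row - a, ⟨by omega, by omega⟩, by ring⟩, ⟨⟨⟨⟨h0, h8⟩, hc0⟩, hc8⟩, hkq⟩⟩
    · rintro ⟨⟨n, ⟨hn1, hn8⟩, rfl⟩, ⟨⟨⟨⟨h0, h8⟩, hc0⟩, hc8⟩, hkq⟩⟩
      exact ⟨⟨h0, h8⟩, by omega, ⟨⟨⟨⟨hc0, hc8⟩, by omega⟩, by omega⟩, hkq⟩⟩

-- the "below" branch of B equals A's downward scan
theorem branch_below (row col : Int) (matrix : List (List String)) :
    (!((PySem.Dict.mk (kqItems row col matrix)).keys.filter (fun r => decide (row < r))).isEmpty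
      && ((PySem.Dict.mk (kqItems row col matrix)).getD
            ((PySem.List.min?
                ((PySem.Dict.mk (kqItems row col matrix)).keys.filter (fun r => decide (row < r)))
                (fun x => x)).getD 0) "" == "K"))
    = (((PySem.List.pyRange 1 8 1).findSome? (fun n => fd row col matrix (row + n))) == some "K") := by
  rw [below_eq, List.filter_map, findSome?_eq_head?_filter]
  simp only [Function.comp_def]
  have hpf : ((PySem.List.pyRange 1 8 1).filter
      (fun n => (fd row col matrix (row + n)).isSome)).Pairwise (· < ·) :=
    (PySem.List.pairwise_lt_pyRange_one 1 8).filter _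
  cases ht : (PySem.List.pyRange 1 8 1).filter (fun n => (fd row col matrix (row + n)).isSome) with
  | nil => simp
  | cons n0 t' =>
    rw [ht] at hpf
    have hsorted : (((n0 :: t').map (fun n => row + n)).Pairwise (· ≤ ·)) := by
      refine (List.Pairwise.map _ ?_ hpf).imp le_of_lt
      intro a b hab; omega
    have hn0 : n0 ∈ (PySem.List.pyRange 1 8 1).filter
        (fun n => (fd row col matrix (row + n)).isSome) := by
      rw [ht]; exact List.mem_cons_self
    rw [List.mem_filter] at hn0
    obtain ⟨p, hp⟩ := Option.isSome_iff_exists.mp hn0.2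
    have hn17 : 1 ≤ n0 ∧ n0 < 8 := PySem.List.mem_pyRange_one.mp hn0.1
    have hd1 : 1 ≤ |row + n0 - row| := by
      rw [Int.abs_eq_natAbs]; omega
    have hd7 : |row + n0 - row| ≤ 7 := by
      rw [Int.abs_eq_natAbs]; omega
    have hmem : (row + n0, p) ∈ (PySem.Dict.mk (kqItems row col matrix)).items :=
      mem_kqItems hp hd1 hd7
    have hgetD := PySem.Dict.getD_of_mem_items _ hmem (nodup_keys_kq row col matrix) ""
    rw [min?_of_sorted _ hsorted]
    simp [hgetD, hp]

-- the "above" branch of B equals A's upward scan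
theorem branch_above (row col : Int) (matrix : List (List String)) :
    (!((PySem.Dict.mk (kqItems row col matrix)).keys.filter (fun r => decide (r < row))).isEmpty
      && ((PySem.Dict.mk (kqItems row col matrix)).getD
            ((PySem.List.max?
                ((PySem.Dict.mk (kqItems row col matrix)).keys.filter (fun r => decide (r < row)))
                (fun x => x)).getD 0) "" == "K"))
    = (((PySem.List.pyRange 1 8 1).findSome? (fun n => fd row col matrix (row - n))) == some "K") := by
  rw [above_eq, List.filter_map, findSome?_eq_head?_filter]
  simp only [Function.comp_def]
  have hpf : ((PySem.List.pyRange 1 8 1).filter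
      (fun n => (fd row col matrix (row - n)).isSome)).Pairwise (· < ·) :=
    (PySem.List.pairwise_lt_pyRange_one 1 8).filter _
  cases ht : (PySem.List.pyRange 1 8 1).filter (fun n => (fd row col matrix (row - n)).isSome) with
  | nil => simp
  | cons n0 t' =>
    rw [ht] at hpf
    have hsorted : ((((n0 :: t').map (fun n => row - n)).reverse).Pairwise (· ≤ ·)) := by
      refine List.pairwise_reverse.mpr ((List.Pairwise.map _ ?_ hpf).imp (fun h => le_of_lt h))
      intro a b hab
      show row - b < row - a
      omega
    have hn0 : n0 ∈ (PySem.List.pyRange 1 8 1).filter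
        (fun n => (fd row col matrix (row - n)).isSome) := by
      rw [ht]; exact List.mem_cons_self
    rw [List.mem_filter] at hn0
    obtain ⟨p, hp⟩ := Option.isSome_iff_exists.mp hn0.2
    have hn17 : 1 ≤ n0 ∧ n0 < 8 := PySem.List.mem_pyRange_one.mp hn0.1
    have hd1 : 1 ≤ |row - n0 - row| := by
      rw [Int.abs_eq_natAbs]; omega
    have hd7 : |row - n0 - row| ≤ 7 := by
      rw [Int.abs_eq_natAbs]; omega
    have hmem : (row - n0, p) ∈ (PySem.Dict.mk (kqItems row col matrix)).items :=
      mem_kqItems hp hd1 hd7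
    have hgetD := PySem.Dict.getD_of_mem_items _ hmem (nodup_keys_kq row col matrix) ""
    rw [max?_of_sorted _ hsorted]
    rw [List.getLast?_reverse]
    simp [hgetD, hp]

-- ===== VERDICT (by name: the statement is the Claim_ definition above) =====
theorem second_diagonal_spec : Claim_equal_second_diagonal := by
  intro row col matrix _ _
  unfold Spec_second_diagonal second_diagonal second_diagonal_alt
  simp only [List.any_append, loopA1, loopA2, branch_below, branch_above]
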